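-- pv_equiv track=rewrite | github.com/Minxhvk/Algorithm | BOJ/Greedy/21314.py | convert
-- ===== SOURCE A (Python) =====
-- def convert(arr):
--
--     converted_str = ''
--
--     for i in arr:
--         if len(i) <= 0 : continue
--
--         if "K" in i:
--             converted_str += str(int(5 * (10**(len(i)-1))))
--         else:
--             converted_str += str(int(10 ** (len(i) - 1)))
--
--     return converted_str
-- ===== SOURCE B (Python) =====
-- def convert(arr):
--     out = []
--     for s in arr:
--         for j, _ in enumerate(s):
--             out.append('0' if j else ('5' if 'K' in s else '1'))
--     return ''.join(out)
-- ===== Notes on version B (the rewrite author's own statement) =====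
-- stated objective: alternative
-- what changed: B does no arithmetic and builds no per-chunk strings: it rewrites the input character by character (each character of a chunk becomes '0', except the chunk's first character which becomes '5' or '1' depending on whether the chunk contains 'K'), accumulating single output characters, whereas A computes 5*10**(len-1) or 10**(len-1) as a bignum per chunk and converts it to its decimal string.
import Mathlib
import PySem

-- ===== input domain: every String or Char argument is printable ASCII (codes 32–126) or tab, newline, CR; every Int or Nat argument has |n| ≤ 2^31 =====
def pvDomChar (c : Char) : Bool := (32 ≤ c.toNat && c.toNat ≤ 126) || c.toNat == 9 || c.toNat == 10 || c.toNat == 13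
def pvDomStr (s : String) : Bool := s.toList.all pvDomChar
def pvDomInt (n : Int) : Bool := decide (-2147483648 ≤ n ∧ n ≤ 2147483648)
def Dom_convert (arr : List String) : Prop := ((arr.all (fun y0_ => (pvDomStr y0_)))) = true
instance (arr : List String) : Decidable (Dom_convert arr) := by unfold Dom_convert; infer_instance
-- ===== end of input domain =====

-- B rewrites the input character by character (first char of a chunk -> '5'/'1', others -> '0')
-- instead of converting a computed power-of-ten integer to a decimal string (objective: alternative).


-- ===== PORT A =====
-- A: for each nonempty chunk append str(5*10^(len-1)) if it contains 'K' else str(10^(len-1)).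
-- The exponent len(i)-1 is ≥ 0 on the branch (guard len ≤ 0 skips), so '.toNat' is exact there.
def convert (arr : List String) : String :=
  arr.foldl
    (fun converted_str i =>
      if PySem.Str.len i ≤ 0 then converted_str
      else if PySem.Str.isIn "K" i then
        converted_str ++ PySem.Int.toStr (5 * 10 ^ (PySem.Str.len i - 1).toNat)
      else
        converted_str ++ PySem.Int.toStr (10 ^ (PySem.Str.len i - 1).toNat))
    ""

-- ===== PORT B =====
-- B: per-character substitution: index 0 of a chunk becomes '5'/'1', every later index '0';
-- single output characters are accumulated and joined at the end.
def convert_alt (arr : List String) : String :=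
  String.ofList
    (arr.foldl
      (fun out s =>
        (PySem.List.enumerate s.toList).foldl
          (fun out (p : Int × Char) =>
            out ++ [if p.1 ≠ 0 then '0'
                    else if PySem.Str.isIn "K" s then '5' else '1'])
          out)
      [])

-- ===== PRECONDITION & SPEC =====
def Spec_convert (arr : List String) (out : String) : Prop := out = convert_alt arr
instance (arr : List String) (out : String) : Decidable (Spec_convert arr out) := by unfold Spec_convert; infer_instance

-- ===== CLAIM (what is proved, stated in full; the proofs are below) =====
def Claim_equal_convert : Prop := ∀ (arr : List String), Dom_convert arr → Spec_convert arr (convert arr)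

-- ===== LEMMAS AND PROOFS =====

theorem toDigitsCore_step (f n : ℕ) (acc : List Char) :
    Nat.toDigitsCore 10 (f + 1) n acc
      = if n / 10 = 0 then Nat.digitChar (n % 10) :: acc
        else Nat.toDigitsCore 10 f (n / 10) (Nat.digitChar (n % 10) :: acc) := rfl

-- str(d * 10^k) for a single digit 1 ≤ d ≤ 9 is the digit followed by k zeros.
theorem toDigitsCore_digit_pow (d : ℕ) (hd1 : 1 ≤ d) (hd9 : d ≤ 9) :
    ∀ (k f : ℕ), k ≤ f → ∀ (acc : List Char),
      Nat.toDigitsCore 10 (f + 1) (d * 10 ^ k) acc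
        = Nat.digitChar d :: List.replicate k '0' ++ acc := by
  intro k
  induction k with
  | zero =>
    intro f _ acc
    have hdiv : d / 10 = 0 := Nat.div_eq_of_lt (by omega)
    have hmod : d % 10 = d := Nat.mod_eq_of_lt (by omega)
    simp [toDigitsCore_step, hdiv, hmod]
  | succ k ih =>
    intro f hkf acc
    obtain ⟨f', rfl⟩ : ∃ f', f = f' + 1 := ⟨f - 1, by omega⟩
    have hdiv : d * 10 ^ (k + 1) / 10 = d * 10 ^ k := by
      rw [pow_succ, ← Nat.mul_assoc, Nat.mul_div_cancel _ (by norm_num)]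
    have hmod : d * 10 ^ (k + 1) % 10 = 0 := by
      rw [pow_succ, ← Nat.mul_assoc, Nat.mul_mod_left]
    have hne : ¬ d * 10 ^ (k + 1) / 10 = 0 := by
      rw [hdiv]; positivity
    rw [toDigitsCore_step, if_neg hne, hdiv, hmod, ih f' (by omega)]
    have hzero : Nat.digitChar 0 = '0' := rfl
    rw [hzero, List.replicate_succ']
    simp

theorem toDigits_digit_pow (d k : ℕ) (hd1 : 1 ≤ d) (hd9 : d ≤ 9) :
    Nat.toDigits 10 (d * 10 ^ k) = Nat.digitChar d :: List.replicate k '0' := by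
  have hk : k ≤ d * 10 ^ k := by
    have h1 : k < 10 ^ k := Nat.lt_pow_self (by norm_num)
    have h2 : 10 ^ k ≤ d * 10 ^ k := Nat.le_mul_of_pos_left _ (by omega)
    omega
  calc Nat.toDigits 10 (d * 10 ^ k)
      = Nat.toDigitsCore 10 (d * 10 ^ k + 1) (d * 10 ^ k) [] := rfl
    _ = Nat.digitChar d :: List.replicate k '0' ++ [] :=
        toDigitsCore_digit_pow d hd1 hd9 k _ hk []
    _ = _ := by simp

theorem toChars_digit_pow (d k : ℕ) (hd1 : 1 ≤ d) (hd9 : d ≤ 9) :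
    PySem.Int.toChars ((d : ℤ) * 10 ^ k) = Nat.digitChar d :: List.replicate k '0' := by
  have hnn : ¬ ((d : ℤ) * 10 ^ k < 0) := not_lt.mpr (by positivity)
  have habs : ((d : ℤ) * 10 ^ k).toNat = d * 10 ^ k := by
    rw [show ((d : ℤ) * 10 ^ k) = ((d * 10 ^ k : ℕ) : ℤ) from by push_cast; ring,
      Int.toNat_natCast]
  simp [PySem.Int.toChars, hnn, habs, toDigits_digit_pow d k hd1 hd9]

-- the per-chunk contribution both programs produce for a nonempty chunk
def pvPiece (s : String) : List Char :=
  (if PySem.Str.isIn "K" s then '5' else '1') :: List.replicate (s.toList.length - 1) '0'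

-- the A-side loop, expressed on char lists
theorem convert_foldl_toList (arr : List String) : ∀ (acc : String),
    (arr.foldl
      (fun converted_str i =>
        if PySem.Str.len i ≤ 0 then converted_str
        else if PySem.Str.isIn "K" i then
          converted_str ++ PySem.Int.toStr (5 * 10 ^ (PySem.Str.len i - 1).toNat)
        else
          converted_str ++ PySem.Int.toStr (10 ^ (PySem.Str.len i - 1).toNat)) acc).toList
    = acc.toList ++ (arr.filter (fun s => s.toList.length ≠ 0)).flatMap pvPiece := by
  induction arr with
  | nil => simp
  | cons s rest ih =>
    intro acc
    by_cases h0 : s.toList.length = 0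
    · have hle : PySem.Str.len s ≤ 0 := by simp [PySem.Str.len, h0]
      have hs : s = "" := by
        cases s; simp_all
      simp only [List.foldl_cons, if_pos hle, List.filter_cons]
      rw [ih acc]
      simp [hs]
    · have hs : ¬ s = "" := by
        intro h; subst h; simp at h0
      have hlt : ¬ PySem.Str.len s ≤ 0 := by
        simp only [PySem.Str.len]; omega
      have hkexp : (PySem.Str.len s - 1).toNat = s.toList.length - 1 := by
        simp only [PySem.Str.len]; omega
      have hlen : s.toList.length = s.length := by simp
      have h5 : PySem.Int.toChars (5 * 10 ^ (s.length - 1))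
          = '5' :: List.replicate (s.length - 1) '0' := by
        have := toChars_digit_pow 5 (s.length - 1) (by norm_num) (by norm_num)
        norm_num at this ⊢
        exact this
      have h1 : PySem.Int.toChars (10 ^ (s.length - 1))
          = '1' :: List.replicate (s.length - 1) '0' := by
        have := toChars_digit_pow 1 (s.length - 1) (by norm_num) (by norm_num)
        norm_num at this ⊢
        exact this
      rw [hlen] at hkexp
      simp only [List.foldl_cons, if_neg hlt, List.filter_cons]
      by_cases hK : PySem.Str.isIn "K" s
      · rw [if_pos hK, ih]
        simp only [PySem.Str.isIn, show "K".toList = ['K'] from rfl] at hK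
        simp [hs, pvPiece, PySem.Str.isIn, hK, h5, PySem.Int.toStr, hlen]
      · rw [if_neg hK, ih]
        simp only [PySem.Str.isIn, show "K".toList = ['K'] from rfl] at hK
        simp [hs, pvPiece, PySem.Str.isIn, hK, h1, PySem.Int.toStr, hlen]

-- a fold that only appends is the accumulator followed by a map
theorem foldl_append_map {α β : Type} (f : α → β) :
    ∀ (L : List α) (out : List β),
      L.foldl (fun out p => out ++ [f p]) out = out ++ L.map f := by
  intro L
  induction L with
  | nil => simp
  | cons x xs ih => intro out; simp [ih]

-- every entry of enumerate _ s with s ≥ 1 maps to '0'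
theorem enumerate_map_pos (h : Char) :
    ∀ (l : List Char) (s : Int), 1 ≤ s →
      (PySem.List.enumerate l s).map
          (fun p => if p.1 ≠ 0 then '0' else h)
        = List.replicate l.length '0' := by
  intro l
  induction l with
  | nil => simp [PySem.List.enumerate_nil]
  | cons c cs ih =>
    intro s hs
    rw [PySem.List.enumerate_cons, List.map_cons, ih (s + 1) (by omega)]
    have : ¬ s = 0 := by omega
    simp [this, List.replicate_succ]

-- the inner character loop of B yields exactly pvPiece for a nonempty chunk
theorem inner_piece (s : String) (h0 : s.toList.length ≠ 0) (out : List Char) :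
    (PySem.List.enumerate s.toList).foldl
        (fun out (p : Int × Char) =>
          out ++ [if p.1 ≠ 0 then '0'
                  else if PySem.Str.isIn "K" s then '5' else '1'])
        out
      = out ++ pvPiece s := by
  rw [foldl_append_map]
  congr 1
  obtain ⟨c, cs, hcs⟩ : ∃ c cs, s.toList = c :: cs := by
    cases hl : s.toList with
    | nil => exact absurd (by simp [hl]) h0
    | cons c cs => exact ⟨c, cs, rfl⟩
  rw [hcs, PySem.List.enumerate_cons, List.map_cons, show (0 : Int) + 1 = 1 from rfl,
    enumerate_map_pos _ cs 1 le_rfl]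
  simp [pvPiece, hcs]

-- the B-side loop, on char lists
theorem convert_alt_foldl (arr : List String) : ∀ (out : List Char),
    arr.foldl
      (fun out s =>
        (PySem.List.enumerate s.toList).foldl
          (fun out (p : Int × Char) =>
            out ++ [if p.1 ≠ 0 then '0'
                    else if PySem.Str.isIn "K" s then '5' else '1'])
          out)
      out
    = out ++ (arr.filter (fun s => s.toList.length ≠ 0)).flatMap pvPiece := by
  induction arr with
  | nil => simp
  | cons s rest ih =>
    intro out
    by_cases h0 : s.toList.length = 0
    · have he : s.toList = [] := List.length_eq_zero_iff.mp h0
      have hs : s = "" := by cases s; simp_all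
      simp only [List.foldl_cons, he, PySem.List.enumerate_nil, List.foldl_nil,
        List.filter_cons]
      rw [ih out]
      simp
    · have hs : ¬ s = "" := by intro h; subst h; simp at h0
      simp only [List.foldl_cons, List.filter_cons]
      rw [inner_piece s h0 out, ih]
      simp [hs]

-- ===== VERDICT (by name: the statement is the Claim_ definition above) =====
theorem convert_spec : Claim_equal_convert := by
  intro arr _
  unfold Spec_convert
  apply String.toList_injective
  unfold convert convert_alt
  rw [convert_foldl_toList arr "", convert_alt_foldl arr []]
  simp
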